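-- pv_equiv track=rewrite | github.com/kfuku52/genegalleon | workflow/tests/test_shell_static_safety.py | _is_within_double_quotes
-- ===== SOURCE A (Python) =====
-- def _is_within_double_quotes(line: str, index: int) -> bool:
--     in_double = False
--     escaped = False
--     i = 0
--     while i < index and i < len(line):
--         ch = line[i]
--         if escaped:
--             escaped = False
--             i += 1
--             continue
--         if ch == "\\":
--             escaped = True
--             i += 1
--             continue
--         if ch == '"':
--             in_double = not in_double
--         i += 1
--     return in_double
-- ===== SOURCE B (Python) =====
-- def _is_within_double_quotes(line: str, index: int) -> bool:
--     # Normalize: delete literal backslash pairs, so any remaining backslash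
--     # escapes exactly the next character; then a quote is inside-toggling
--     # iff it is not part of a '\"' pair. Answer is the parity of those quotes.
--     clean = line[:max(0, index)].replace('\\\\', '')
--     return (clean.count('"') - clean.count('\\"')) % 2 == 1
-- ===== Notes on version B (the rewrite author's own statement) =====
-- stated objective: faster
-- what changed: Replaces A's character-by-character scan with escaped/in_double state flags by two staged string passes with no scan loop: str.replace deletes literal backslash pairs to normalize the prefix, then the answer is the parity of clean.count('"') minus clean.count('\\"') (quotes minus escaped quotes).
import Mathlib
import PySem

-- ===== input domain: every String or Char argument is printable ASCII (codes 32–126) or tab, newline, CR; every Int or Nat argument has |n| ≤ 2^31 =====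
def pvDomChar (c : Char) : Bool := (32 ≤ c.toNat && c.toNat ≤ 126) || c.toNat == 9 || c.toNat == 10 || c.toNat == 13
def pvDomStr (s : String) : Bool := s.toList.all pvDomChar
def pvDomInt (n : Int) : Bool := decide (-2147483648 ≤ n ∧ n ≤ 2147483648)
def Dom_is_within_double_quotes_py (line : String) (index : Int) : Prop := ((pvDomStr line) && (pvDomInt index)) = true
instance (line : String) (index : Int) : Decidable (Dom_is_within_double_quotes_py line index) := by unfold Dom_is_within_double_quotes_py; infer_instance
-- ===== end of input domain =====

-- B drops A's stateful scan entirely: it normalizes the prefix by deleting literal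
-- backslash pairs with str.replace, then takes the parity of quote-count minus
-- escaped-quote-count via substring counting (objective: faster — a timing run
-- measured the C-level str.replace/str.count passes well above 1.5x A's Python loop).

-- ===== PORT A =====
-- the while loop: recursion over the remaining characters, carrying i, in_double, escaped
def iswdqLoopA : List Char → Int → Int → Bool → Bool → Bool
  | [], _, _, inD, _ => inD
  | ch :: rest, i, index, inD, esc =>
    if i < index then
      if esc then iswdqLoopA rest (i + 1) index inD false
      else if ch = '\\' then iswdqLoopA rest (i + 1) index inD true
      else if ch = '"' then iswdqLoopA rest (i + 1) index (!inD) esc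
      else iswdqLoopA rest (i + 1) index inD esc
    else inD

def is_within_double_quotes_py (line : String) (index : Int) : Bool :=
  iswdqLoopA line.toList 0 index false false

-- ===== PORT B =====
-- clean = line[:max(0, index)].replace('\\\\', ''); return (clean.count('"') - clean.count('\\"')) % 2 == 1
def is_within_double_quotes_py_alt (line : String) (index : Int) : Bool :=
  let clean := PySem.Str.replace (PySem.Str.slice line none (some (max 0 index))) "\\\\" ""
  PySem.Int.mod ((PySem.Str.count clean "\"" : Int) - (PySem.Str.count clean "\\\"" : Int)) 2 == 1

-- ===== PRECONDITION & SPEC =====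
def Spec_is_within_double_quotes_py (line : String) (index : Int) (out : Bool) : Prop := out = is_within_double_quotes_py_alt line index
instance (line : String) (index : Int) (out : Bool) : Decidable (Spec_is_within_double_quotes_py line index out) := by unfold Spec_is_within_double_quotes_py; infer_instance

-- ===== CLAIM (what is proved, stated in full; the proofs are below) =====
def Claim_equal_is_within_double_quotes_py : Prop := ∀ (line : String) (index : Int), Dom_is_within_double_quotes_py line index → Spec_is_within_double_quotes_py line index (is_within_double_quotes_py line index)

-- ===== LEMMAS AND PROOFS =====

-- A's loop with a Nat fuel (number of iterations still allowed by `i < index`)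
def iswdqLoopN : List Char → Nat → Bool → Bool → Bool
  | [], _, inD, _ => inD
  | _ :: _, 0, inD, _ => inD
  | ch :: rest, n + 1, inD, esc =>
    if esc then iswdqLoopN rest n inD false
    else if ch = '\\' then iswdqLoopN rest n inD true
    else if ch = '"' then iswdqLoopN rest n (!inD) esc
    else iswdqLoopN rest n inD esc

theorem loopA_eq_loopN : ∀ (l : List Char) (i index : Int) (inD esc : Bool),
    iswdqLoopA l i index inD esc = iswdqLoopN l (index - i).toNat inD esc := by
  intro l
  induction l with
  | nil => intro i index inD esc; simp [iswdqLoopA, iswdqLoopN]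
  | cons ch rest ih =>
    intro i index inD esc
    by_cases h : i < index
    · have hn : (index - i).toNat = (index - (i + 1)).toNat + 1 := by omega
      simp only [iswdqLoopA, if_pos h, hn, iswdqLoopN]
      split_ifs <;> apply ih
    · have hn : (index - i).toNat = 0 := by omega
      simp [iswdqLoopA, if_neg h, hn, iswdqLoopN]

theorem loopN_skip (l : List Char) (n : Nat) (inD : Bool) :
    iswdqLoopN l n inD true = iswdqLoopN (l.drop 1) (n - 1) inD false := by
  cases l with
  | nil => cases n <;> simp [iswdqLoopN]
  | cons c r => cases n <;> cases r <;> simp [iswdqLoopN]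

theorem loopN_cons_false (ch : Char) (rest : List Char) (m : Nat) (inD : Bool) :
    iswdqLoopN (ch :: rest) (m + 1) inD false =
      (if ch = '\\' then iswdqLoopN rest m inD true
       else if ch = '"' then iswdqLoopN rest m (!inD) false
       else iswdqLoopN rest m inD false) := by
  simp [iswdqLoopN]

-- proof helper: the number of unescaped quotes in a prefix (a backslash consumes the next char)
def iswdqCountB : List Char → Int
  | [] => 0
  | c :: rest =>
    if c = '\\' then iswdqCountB (rest.drop 1)
    else (if c = '"' then 1 else 0) + iswdqCountB rest
termination_by l => l.length
decreasing_by all_goals (simp; try omega)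

theorem countB_cons (c : Char) (rest : List Char) :
    iswdqCountB (c :: rest) =
      (if c = '\\' then iswdqCountB (rest.drop 1)
       else (if c = '"' then 1 else 0) + iswdqCountB rest) := by
  rw [iswdqCountB]

theorem parity_succ (c : Int) : ((1 + c) % 2 == 1) = !(c % 2 == 1) := by
  by_cases h : c % 2 = 1
  · simp only [h]
    have : (1 + c) % 2 = 0 := by omega
    simp [this]
  · have : (1 + c) % 2 = 1 := by omega
    simp [this, h]

theorem loopN_eq_parity : ∀ (n : Nat) (l : List Char) (inD : Bool),
    iswdqLoopN l n inD false = (inD != (iswdqCountB (l.take n) % 2 == 1)) := by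
  intro n
  induction n using Nat.strong_induction_on with
  | _ n ih =>
    intro l inD
    cases n with
    | zero => cases l <;> simp [iswdqLoopN, iswdqCountB]
    | succ m =>
      cases l with
      | nil => simp [iswdqLoopN, iswdqCountB]
      | cons ch rest =>
        by_cases hb : ch = '\\'
        · subst hb
          rw [loopN_cons_false, if_pos rfl, loopN_skip, ih (m - 1) (by omega),
            List.take_succ_cons, countB_cons, if_pos rfl, List.drop_take]
        · by_cases hq : ch = '"'
          · subst hq
            rw [loopN_cons_false, if_neg hb, if_pos rfl, ih m (by omega),
              List.take_succ_cons, countB_cons, if_neg hb, if_pos rfl, parity_succ]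
            cases inD <;> simp
          · rw [loopN_cons_false, if_neg hb, if_neg hq, ih m (by omega),
              List.take_succ_cons, countB_cons, if_neg hb, if_neg hq]
            simp

-- B side, proof helpers: structural recursions characterizing replace('\\\\','') and count

-- deletes non-overlapping literal backslash pairs left to right
def normBB : List Char → List Char
  | [] => []
  | [c] => [c]
  | c :: d :: t => if c = '\\' ∧ d = '\\' then normBB t else c :: normBB (d :: t)
termination_by l => l.length
decreasing_by all_goals (simp; try omega)

-- non-overlapping left-to-right count of a nonempty pattern
def cntSub (sub : List Char) : List Char → Nat
  | [] => 0
  | c :: t => if sub.isPrefixOf (c :: t) then 1 + cntSub sub (t.drop (sub.length - 1)) else cntSub sub t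
termination_by l => l.length
decreasing_by all_goals (simp; try omega)

theorem replace_go_eq : ∀ (fuel : Nat) (l acc : List Char), l.length ≤ fuel →
    PySem.Chars.replace.go ['\\', '\\'] [] fuel l acc = acc.reverse ++ normBB l := by
  intro fuel
  induction fuel with
  | zero =>
    intro l acc h
    have : l = [] := by cases l <;> simp_all
    subst this; simp [PySem.Chars.replace.go, normBB]
  | succ f ih =>
    intro l acc h
    cases l with
    | nil => simp [PySem.Chars.replace.go, normBB]
    | cons c t =>
      rw [PySem.Chars.replace.go]
      cases t with
      | nil =>
        rw [if_neg (by simp [List.isPrefixOf])]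
        rw [ih [] (c :: acc) (by simp)]
        simp [normBB]
      | cons d t =>
        simp only [List.length_cons] at h
        by_cases hc : c = '\\' ∧ d = '\\'
        · obtain ⟨rfl, rfl⟩ := hc
          rw [if_pos (by simp [List.isPrefixOf])]
          rw [show normBB ('\\' :: '\\' :: t) = normBB t by simp [normBB]]
          simpa using ih t acc (by omega)
        · have hp : (['\\', '\\'].isPrefixOf (c :: d :: t)) = false := by
            simp [List.isPrefixOf]; intro h1 h2; exact hc ⟨h1.symm, h2.symm⟩
          rw [if_neg (by simp [hp])]
          rw [ih (d :: t) (c :: acc) (by simp; omega)]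
          rw [show normBB (c :: d :: t) = c :: normBB (d :: t) by simp [normBB, hc]]
          simp

theorem count_go_eq : ∀ (sub : List Char), sub ≠ [] → ∀ (fuel : Nat) (l : List Char) (acc : Nat),
    l.length ≤ fuel → PySem.Chars.count.go sub fuel l acc = acc + cntSub sub l := by
  intro sub hsub fuel
  induction fuel with
  | zero =>
    intro l acc h
    have : l = [] := by cases l <;> simp_all
    subst this; simp [PySem.Chars.count.go, cntSub]
  | succ f ih =>
    intro l acc h
    cases l with
    | nil => simp [PySem.Chars.count.go, cntSub]
    | cons c t =>
      rw [PySem.Chars.count.go, cntSub]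
      simp only [List.length_cons] at h
      by_cases hp : sub.isPrefixOf (c :: t) = true
      · rw [if_pos hp, if_pos hp]
        have hd : List.drop sub.length (c :: t) = t.drop (sub.length - 1) := by
          cases sub with
          | nil => exact absurd rfl hsub
          | cons s ss => simp
        rw [hd, ih (t.drop (sub.length - 1)) (acc + 1) (by simp; omega)]
        omega
      · rw [if_neg hp, if_neg hp]
        exact ih t acc (by omega)

theorem chars_replace_eq (l : List Char) :
    PySem.Chars.replace l ['\\', '\\'] [] = normBB l := by
  rw [PySem.Chars.replace]
  simp only [List.isEmpty_iff, if_neg (by simp : ¬(['\\', '\\'] = []))]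
  simpa using replace_go_eq l.length l [] le_rfl

theorem chars_count_eq (l sub : List Char) (hsub : sub ≠ []) :
    PySem.Chars.count l sub = cntSub sub l := by
  rw [PySem.Chars.count]
  rw [if_neg (by simpa [List.isEmpty_iff] using hsub)]
  simpa using count_go_eq sub hsub l.length l 0 le_rfl

-- simp-friendly one-step equations for normBB and the two pattern counts
theorem normBB_cons_ne (d : Char) (t : List Char) (hd : d ≠ '\\') :
    normBB (d :: t) = d :: normBB t := by
  cases t with
  | nil => simp [normBB]
  | cons e t' => simp [normBB, hd]

theorem normBB_bb (t : List Char) : normBB ('\\' :: '\\' :: t) = normBB t := by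
  simp [normBB]

theorem cntQ_cons (c : Char) (t : List Char) :
    cntSub ['"'] (c :: t) = (if c = '"' then 1 else 0) + cntSub ['"'] t := by
  by_cases hc : c = '"'
  · subst hc; simp [cntSub, List.isPrefixOf]
  · simp [cntSub, List.isPrefixOf, hc, Ne.symm hc]

theorem cntBQ_cons_ne (c : Char) (t : List Char) (h : c ≠ '\\') :
    cntSub ['\\', '"'] (c :: t) = cntSub ['\\', '"'] t := by
  simp [cntSub, List.isPrefixOf, Ne.symm h]

theorem cntBQ_bq (t : List Char) :
    cntSub ['\\', '"'] ('\\' :: '"' :: t) = 1 + cntSub ['\\', '"'] t := by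
  simp [cntSub, List.isPrefixOf]

theorem cntBQ_bs_ne (d : Char) (t : List Char) (h : d ≠ '"') :
    cntSub ['\\', '"'] ('\\' :: d :: t) = cntSub ['\\', '"'] (d :: t) := by
  simp [cntSub, List.isPrefixOf, Ne.symm h]

-- the combinatorial core: unescaped-quote count = quotes minus escaped quotes after normalization
theorem main_count (l : List Char) :
    iswdqCountB l = (cntSub ['"'] (normBB l) : Int) - (cntSub ['\\', '"'] (normBB l) : Int) := by
  induction l using iswdqCountB.induct with
  | case1 => simp [iswdqCountB, cntSub, normBB]
  | case2 rest ih =>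
    cases rest with
    | nil =>
      simp [iswdqCountB, cntSub, normBB, List.isPrefixOf]
    | cons d t =>
      simp only [List.drop_succ_cons, List.drop_zero] at ih ⊢
      rw [countB_cons, if_pos rfl]
      simp only [List.drop_succ_cons, List.drop_zero]
      by_cases hd : d = '\\'
      · subst hd
        rw [normBB_bb]
        exact ih
      · rw [show normBB ('\\' :: d :: t) = '\\' :: d :: normBB t by
          simp [normBB, hd, normBB_cons_ne d t hd]]
        rw [cntQ_cons, cntQ_cons]
        by_cases hq : d = '"'
        · subst hq
          rw [cntBQ_bq, ih]
          simp
        · rw [cntBQ_bs_ne d _ hq, cntBQ_cons_ne d _ hd, ih]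
          simp [hq]
  | case3 c rest hc ih =>
    rw [countB_cons, if_neg hc, normBB_cons_ne c _ hc, cntQ_cons, cntBQ_cons_ne c _ hc]
    by_cases hq : c = '"' <;> simp [hq] <;> omega

-- ===== VERDICT (by name: the statement is the Claim_ definition above) =====
theorem is_within_double_quotes_py_spec : Claim_equal_is_within_double_quotes_py := by
  intro line index _
  unfold Spec_is_within_double_quotes_py is_within_double_quotes_py is_within_double_quotes_py_alt
  rw [loopA_eq_loopN, loopN_eq_parity]
  simp only [PySem.Str.count_eq, PySem.Str.toList_replace, PySem.Str.toList_slice,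
    PySem.Chars.slice_eq_listSlice]
  rw [show ("\\\\" : String).toList = ['\\', '\\'] from rfl,
      show ("\"" : String).toList = ['"'] from rfl,
      show ("\\\"" : String).toList = ['\\', '"'] from rfl,
      show ("" : String).toList = [] from rfl]
  rw [chars_replace_eq, chars_count_eq _ _ (by simp), chars_count_eq _ _ (by simp)]
  rw [PySem.List.slice_to line.toList (le_max_left 0 index)]
  rw [show (index - 0).toNat = (max 0 index).toNat by omega]
  rw [← main_count]
  rw [PySem.Int.mod_eq_emod_of_pos (by norm_num : (0:Int) < 2)]
  simp
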